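-- pv_equiv track=rewrite | github.com/peterpei666/leetcode_python | 3659. Partition Array Into K-Distinct Groups.py | partitionArray
-- ===== SOURCE A (Python) =====
-- from typing import List
-- from collections import defaultdict
--
-- def partitionArray(nums: List[int], k: int) -> bool:
--     n = len(nums)
--     if n % k:
--         return False
--     mp = defaultdict(int)
--     for i in nums:
--         mp[i] += 1
--     for _, cnt in mp.items():
--         if cnt > n // k:
--             return False
--     return True
-- ===== SOURCE B (Python) =====
-- def partitionArray(nums, k):
--     n = len(nums)
--     if n % k:
--         return False
--     limit = n // k
--     run = 0
--     prev = 0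
--     for x in sorted(nums):
--         if run > 0 and x == prev:
--             run += 1
--         else:
--             run = 1
--             prev = x
--         if run > limit:
--             return False
--     return True
-- ===== Notes on version B (the rewrite author's own statement) =====
-- stated objective: alternative
-- what changed: Replaces the hash-map frequency counting plus a second pass over dict items by a sort-then-scan: sort the list once and track the length of each run of equal consecutive elements, failing as soon as a run exceeds n // k.
import Mathlib
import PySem

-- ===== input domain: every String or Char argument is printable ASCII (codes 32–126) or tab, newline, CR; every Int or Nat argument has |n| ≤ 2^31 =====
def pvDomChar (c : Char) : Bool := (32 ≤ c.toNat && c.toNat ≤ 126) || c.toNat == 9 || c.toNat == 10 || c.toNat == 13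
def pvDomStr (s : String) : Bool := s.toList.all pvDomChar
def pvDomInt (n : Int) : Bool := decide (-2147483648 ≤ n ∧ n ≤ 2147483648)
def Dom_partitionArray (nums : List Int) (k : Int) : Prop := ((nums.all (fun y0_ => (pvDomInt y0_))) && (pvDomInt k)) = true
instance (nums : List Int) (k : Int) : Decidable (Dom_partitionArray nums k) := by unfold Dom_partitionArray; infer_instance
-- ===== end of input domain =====

-- B replaces A's hash-map frequency count + dict-items pass by a sort-then-run-length scan (alternative algorithm, same results).


-- ===== PORT A =====
-- the 'for _, cnt in mp.items(): if cnt > n // k: return False' loop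
def checkItems (limit : Int) : List (Int × Int) → Bool
  | [] => true
  | (_, cnt) :: rest => if cnt > limit then false else checkItems limit rest

def partitionArray (nums : List Int) (k : Int) : Bool :=
  let n : Int := nums.length
  if PySem.Int.mod n k ≠ 0 then false
  else
    let mp := nums.foldl (fun d i => d.modify i 0 (· + 1)) PySem.Dict.empty
    checkItems (PySem.Int.floordiv n k) mp.items

-- ===== PORT B =====
-- the 'for x in sorted(nums)' run-length scan with early False
def altScan (limit : Int) : List Int → Int → Int → Bool
  | [], _, _ => true
  | x :: rest, prev, run =>
    let run' : Int := if run > 0 && x == prev then run + 1 else 1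
    if run' > limit then false else altScan limit rest x run'

def partitionArray_alt (nums : List Int) (k : Int) : Bool :=
  let n : Int := nums.length
  if PySem.Int.mod n k ≠ 0 then false
  else altScan (PySem.Int.floordiv n k) (PySem.List.sorted nums (fun x => x) false) 0 0

-- ===== PRECONDITION & SPEC =====
-- A raises ZeroDivisionError at 'n % k' when k = 0; excluded.
def Pre_partitionArray (nums : List Int) (k : Int) : Prop := k ≠ 0
instance (nums : List Int) (k : Int) : Decidable (Pre_partitionArray nums k) := by unfold Pre_partitionArray; infer_instance
-- (nums is unused in Pre_; the signature is fixed)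
def pvWitness_partitionArray : List Int × Int := ([1, 1, 2, 2], 2)

def Spec_partitionArray (nums : List Int) (k : Int) (out : Bool) : Prop := out = partitionArray_alt nums k
instance (nums : List Int) (k : Int) (out : Bool) : Decidable (Spec_partitionArray nums k out) := by unfold Spec_partitionArray; infer_instance

-- ===== CLAIM (what is proved, stated in full; the proofs are below) =====
def Claim_equal_partitionArray : Prop := ∀ (nums : List Int) (k : Int), Dom_partitionArray nums k → Pre_partitionArray nums k → Spec_partitionArray nums k (partitionArray nums k)

-- ===== LEMMAS AND PROOFS =====

lemma count_cons_ne {z y : Int} (h : z ≠ y) (l : List Int) :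
    (y :: l).count z = l.count z := by
  simp [Ne.symm h]

lemma checkItems_eq_all (limit : Int) (l : List (Int × Int)) :
    checkItems limit l = l.all (fun p => decide (p.2 ≤ limit)) := by
  induction l with
  | nil => rfl
  | cons p rest ih =>
    obtain ⟨a, b⟩ := p
    simp only [checkItems, List.all_cons, ih]
    split_ifs with h
    · simp [not_le.mpr h]
    · simp [not_lt.mp h]

-- A's value = "every multiplicity ≤ limit" (after the divisibility guard)
lemma A_char (nums : List Int) (limit : Int) :
    checkItems limit (nums.foldl (fun d i => d.modify i 0 (· + 1)) PySem.Dict.empty).items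
      = decide (∀ x ∈ nums, (nums.count x : Int) ≤ limit) := by
  rw [show (nums.foldl (fun d i => d.modify i 0 (· + 1)) PySem.Dict.empty) = PySem.Dict.counter nums from rfl]
  rw [PySem.Dict.items_counter, checkItems_eq_all]
  rw [Bool.eq_iff_iff]
  simp only [List.all_map, List.all_eq_true, Function.comp_apply, decide_eq_true_eq]
  constructor
  · intro h x hx
    exact h x ((PySem.Set.mem_ofList nums x).mpr hx)
  · intro h x hx
    exact h x ((PySem.Set.mem_ofList nums x).mp hx)

-- Run-length scan on a sorted tail: invariant characterisation
lemma altScan_char (limit : Int) (l : List Int) (x : Int) (c : Int)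
    (hp : l.Pairwise (· ≤ ·)) (hlo : ∀ z ∈ l, x ≤ z) (hc1 : 1 ≤ c) (hcl : c ≤ limit) :
    altScan limit l x c =
      decide ((c + (l.count x : Int) ≤ limit) ∧ ∀ y ∈ l, y ≠ x → ((l.count y : Int) ≤ limit)) := by
  induction l generalizing x c with
  | nil => simp [altScan, hcl]
  | cons y rest ih =>
    have hxy : x ≤ y := hlo y (by simp)
    have hrest_lo : ∀ z ∈ rest, y ≤ z := fun z hz => (List.pairwise_cons.mp hp).1 z hz
    have hprest : rest.Pairwise (· ≤ ·) := (List.pairwise_cons.mp hp).2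
    by_cases hyx : y = x
    · subst hyx
      have hstep : altScan limit (y :: rest) y c =
          if c + 1 > limit then false else altScan limit rest y (c + 1) := by
        rw [altScan]
        simp [show c > 0 by omega]
      rw [hstep]
      by_cases hb : c + 1 > limit
      · rw [if_pos hb]
        symm
        simp only [decide_eq_false_iff_not]
        rintro ⟨h1, -⟩
        simp only [List.count_cons_self] at h1
        push_cast at h1
        omega
      · rw [if_neg hb]
        rw [ih y (c+1) hprest hrest_lo (by omega) (by omega)]
        congr 1
        · apply propext
          constructor
          · rintro ⟨h1, h2⟩
            constructor
            · simp only [List.count_cons_self]; push_cast; omega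
            · intro z hz hzy
              rcases List.mem_cons.mp hz with h | h
              · exact absurd h hzy
              · have := h2 z h hzy
                rwa [count_cons_ne hzy _]
          · rintro ⟨h1, h2⟩
            constructor
            · simp only [List.count_cons_self] at h1; push_cast at h1 ⊢; omega
            · intro z hz hzy
              have := h2 z (List.mem_cons_of_mem _ hz) hzy
              rwa [count_cons_ne hzy _] at this
    · -- y ≠ x : new run starts; x never occurs again (strictly below y ≤ rest)
      have hxlt : x < y := lt_of_le_of_ne hxy (fun h => hyx h.symm)
      have hx_not : x ∉ (y :: rest) := by
        intro hmem
        rcases List.mem_cons.mp hmem with h | h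
        · exact hyx h.symm
        · exact absurd (hrest_lo x h) (not_le.mpr hxlt)
      have hstep : altScan limit (y :: rest) x c =
          if (1:Int) > limit then false else altScan limit rest y 1 := by
        rw [altScan]
        simp [hyx]
      rw [hstep]
      by_cases hb : (1:Int) > limit
      · rw [if_pos hb]
        have hcy : 1 ≤ ((y :: rest).count y : Int) := by
          have := List.count_pos_iff.mpr (List.mem_cons_self (a := y) (l := rest))
          exact_mod_cast this
        symm
        simp only [decide_eq_false_iff_not]
        rintro ⟨-, h2⟩
        exact absurd (h2 y (by simp) hyx) (by omega)
      · rw [if_neg hb]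
        rw [ih y 1 hprest hrest_lo (le_refl 1) (by omega)]
        congr 1
        apply propext
        have hcx0 : (y :: rest).count x = 0 := List.count_eq_zero.mpr hx_not
        constructor
        · rintro ⟨h1, h2⟩
          constructor
          · rw [hcx0]; push_cast; omega
          · intro z hz hzx
            rcases List.mem_cons.mp hz with h | h
            · subst h; simp only [List.count_cons_self]; push_cast; omega
            · by_cases hzy : z = y
              · subst hzy; simp only [List.count_cons_self]; push_cast; omega
              · rw [count_cons_ne hzy _]; exact h2 z h hzy
        · rintro ⟨h1, h2⟩
          constructor
          · have := h2 y (by simp) hyx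
            simp only [List.count_cons_self] at this; push_cast at this ⊢; omega
          · intro z hz hzy
            have hzx : z ≠ x := by
              intro h; subst h
              exact absurd (hrest_lo z hz) (not_le.mpr hxlt)
            have := h2 z (List.mem_cons_of_mem _ hz) hzx
            rwa [count_cons_ne hzy _] at this

-- B's value = "every multiplicity ≤ limit" (after the divisibility guard)
lemma B_char (nums : List Int) (limit : Int) :
    altScan limit (PySem.List.sorted nums (fun x => x) false) 0 0
      = decide (∀ x ∈ nums, (nums.count x : Int) ≤ limit) := by
  set s := PySem.List.sorted nums (fun x => x) false with hs
  have hperm : s.Perm nums := PySem.List.sorted_perm nums (fun x => x) false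
  have hcount : ∀ x, s.count x = nums.count x := fun x => hperm.count_eq x
  have hmem : ∀ x, x ∈ s ↔ x ∈ nums := fun x => hperm.mem_iff
  have hpair : s.Pairwise (· ≤ ·) := by
    have := PySem.List.sorted_pairwise nums (fun x => x)
    simpa using this
  have goal_eq : decide (∀ x ∈ nums, (nums.count x : Int) ≤ limit)
      = decide (∀ x ∈ s, (s.count x : Int) ≤ limit) := by
    congr 1
    apply propext
    constructor
    · intro h x hx; rw [hcount]; exact h x ((hmem x).mp hx)
    · intro h x hx; rw [← hcount]; exact h x ((hmem x).mpr hx)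
  rw [goal_eq]
  cases hsl : s with
  | nil => rfl
  | cons x rest =>
    have hpair' := hsl ▸ hpair
    have hrest_lo : ∀ z ∈ rest, x ≤ z := fun z hz => (List.pairwise_cons.mp hpair').1 z hz
    have hprest : rest.Pairwise (· ≤ ·) := (List.pairwise_cons.mp hpair').2
    have hstep : altScan limit (x :: rest) 0 0 =
        if (1:Int) > limit then false else altScan limit rest x 1 := by
      rw [altScan]
      simp
    rw [hstep]
    by_cases hb : (1:Int) > limit
    · rw [if_pos hb]
      symm
      simp only [decide_eq_false_iff_not]
      intro h
      have := h x (by simp)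
      have hcx : 1 ≤ ((x :: rest).count x : Int) := by
        have := List.count_pos_iff.mpr (List.mem_cons_self (a := x) (l := rest))
        exact_mod_cast this
      omega
    · rw [if_neg hb]
      rw [altScan_char limit rest x 1 hprest hrest_lo (le_refl 1) (by omega)]
      congr 1
      apply propext
      constructor
      · rintro ⟨h1, h2⟩
        intro z hz
        rcases List.mem_cons.mp hz with h | h
        · subst h; simp only [List.count_cons_self]; push_cast; omega
        · by_cases hzx : z = x
          · subst hzx; simp only [List.count_cons_self]; push_cast; omega
          · rw [count_cons_ne hzx _]; exact h2 z h hzx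
      · intro h
        constructor
        · have := h x (by simp)
          simp only [List.count_cons_self] at this; push_cast at this ⊢; omega
        · intro z hz hzx
          have := h z (List.mem_cons_of_mem _ hz)
          rwa [count_cons_ne hzx _] at this

-- ===== VERDICT (by name: the statement is the Claim_ definition above) =====
theorem partitionArray_spec : Claim_equal_partitionArray := by
  intro nums k _hdom _hpre
  unfold Spec_partitionArray partitionArray partitionArray_alt
  by_cases hm : PySem.Int.mod (nums.length : Int) k ≠ 0
  · rw [if_pos hm, if_pos hm]
  · rw [if_neg hm, if_neg hm]
    rw [A_char, B_char]
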